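-- pv_equiv track=rewrite | github.com/vegaFlex/Python--Advanced-Fundamentals-OOP- | Python-Fundamentals/Functions/List Manipulator.py | max_even
-- ===== SOURCE A (Python) =====
-- def max_even(numbers):
--     even_numbers = [num for num in numbers if num % 2 == 0]
--     if len(even_numbers) > 0:
--         max_even_num = max(even_numbers)
--         for i in range(len(numbers) - 1, -1, -1):
--             if numbers[i] == max_even_num:
--                 return i
--     else:
--         return "No matches"
-- ===== SOURCE B (Python) =====
-- def max_even(numbers):
--     best_val = None
--     best_idx = None
--     for i, n in enumerate(numbers):
--         if n % 2 != 0: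
--             continue
--         if best_val is None or n >= best_val:
--             best_val = n
--             best_idx = i
--     return best_idx if best_idx is not None else "No matches"
-- ===== Notes on version B (the rewrite author's own statement) =====
-- stated objective: alternative
-- what changed: Replaced A's three passes (filter evens, max, reverse index scan) by one forward pass that tracks the best even value and, via >=, the last index at which it occurs.
-- outside the precondition, e.g. on max_even([]): A returns 'No matches', B returns 'No matches'; on max_even([1, 3, 5]): A returns 'No matches', B returns 'No matches'
import Mathlib
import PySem

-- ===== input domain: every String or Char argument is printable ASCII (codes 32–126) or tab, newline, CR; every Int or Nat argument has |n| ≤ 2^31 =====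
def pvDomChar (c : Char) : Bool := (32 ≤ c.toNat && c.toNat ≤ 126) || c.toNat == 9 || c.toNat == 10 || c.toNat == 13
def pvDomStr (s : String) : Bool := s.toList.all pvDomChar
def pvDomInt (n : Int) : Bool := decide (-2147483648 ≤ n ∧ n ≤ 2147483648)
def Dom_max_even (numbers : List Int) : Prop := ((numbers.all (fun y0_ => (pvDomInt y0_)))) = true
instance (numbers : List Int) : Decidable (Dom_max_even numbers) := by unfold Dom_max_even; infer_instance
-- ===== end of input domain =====

-- B does one forward pass instead of A's filter + max + reverse scan; return value: some index, none = "No matches".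

-- ===== PORT A =====
-- A: build the even sublist; if nonempty take its max and scan indices len-1..0 for the first (= last) position holding it.
def max_even (numbers : List Int) : Option Int :=
  let even_numbers := numbers.filter (fun num => PySem.Int.mod num 2 == 0)
  if even_numbers.length > 0 then
    match PySem.List.max? even_numbers (fun x => x) with
    | some m =>
        (PySem.List.pyRange ((numbers.length : Int) - 1) (-1) (-1)).find?
          (fun i => PySem.List.pyGet? numbers i == some m)
    | none => none
  else none

-- ===== PORT B =====
-- B: one forward pass over enumerate, keeping (best even value, last index of it); '>= best' updates the index on ties.
def maxEvenStep (acc : Option (Int × Int)) (p : Int × Int) : Option (Int × Int) :=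
  if PySem.Int.mod p.2 2 != 0 then acc
  else
    match acc with
    | none => some (p.2, p.1)
    | some (v, _) => if p.2 ≥ v then some (p.2, p.1) else acc

def max_even_alt (numbers : List Int) : Option Int :=
  ((PySem.List.enumerate numbers 0).foldl maxEvenStep none).map (·.2)

-- ===== PRECONDITION & SPEC =====
-- Pre_ excludes exactly the lists with no even element: there A returns the string "No matches",
-- which is outside the declared Option Int return type (B returns the same string in Python).
def Pre_max_even (numbers : List Int) : Prop :=
  ∃ x ∈ numbers, PySem.Int.mod x 2 = 0
instance (numbers : List Int) : Decidable (Pre_max_even numbers) := by unfold Pre_max_even; infer_instance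
def pvWitness_max_even : List Int := [3, 4, 7, 4]

def Spec_max_even (numbers : List Int) (out : Option Int) : Prop := out = max_even_alt numbers
instance (numbers : List Int) (out : Option Int) : Decidable (Spec_max_even numbers out) := by unfold Spec_max_even; infer_instance

-- ===== CLAIM (what is proved, stated in full; the proofs are below) =====
def Claim_equal_max_even : Prop := ∀ (numbers : List Int), Dom_max_even numbers → Pre_max_even numbers → Spec_max_even numbers (max_even numbers)

-- ===== LEMMAS AND PROOFS =====

def bestOf (l : List Int) : Option (Int × Int) :=
  (PySem.List.enumerate l 0).foldl maxEvenStep none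

theorem bestOf_append (l : List Int) (x : Int) :
    bestOf (l ++ [x]) = maxEvenStep (bestOf l) ((l.length : Int), x) := by
  simp [bestOf, PySem.List.enumerate_append, List.foldl_append, PySem.List.enumerate_cons,
    PySem.List.enumerate_nil]

-- the fold's invariant: none ↔ no evens; some (v,i) ↔ v is the max even, i its last index
def InvME (l : List Int) : Prop :=
  (bestOf l = none ↔ l.filter (fun num => PySem.Int.mod num 2 == 0) = []) ∧
  (∀ v i, bestOf l = some (v, i) →
    PySem.Int.mod v 2 = 0 ∧
    PySem.List.max? (l.filter (fun num => PySem.Int.mod num 2 == 0)) (fun x => x) = some v ∧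
    0 ≤ i ∧ i < (l.length : Int) ∧ PySem.List.pyGet? l i = some v ∧
    (∀ j : Int, i < j → j < (l.length : Int) → PySem.List.pyGet? l j ≠ some v))

theorem max?_id_append (u : List Int) (x : Int) :
    PySem.List.max? (u ++ [x]) (fun y => y) =
      some (match PySem.List.max? u (fun y => y) with | none => x | some v => max v x) := by
  cases u with
  | nil => simp [PySem.List.max?]
  | cons a t =>
    simp [PySem.List.max?_id_cons, List.foldl_append]

theorem pyGet?_append_lt (l : List Int) (x : Int) (j : Int) (h0 : 0 ≤ j) (h : j < (l.length : Int)) :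
    PySem.List.pyGet? (l ++ [x]) j = PySem.List.pyGet? l j := by
  rw [PySem.List.pyGet?_of_nonneg _ h0, PySem.List.pyGet?_of_nonneg _ h0]
  have hj : j.toNat < l.length := by omega
  simp [List.getElem?_append_left hj]

theorem pyGet?_ge_len (l : List Int) (j : Int) (h : (l.length : Int) ≤ j) :
    PySem.List.pyGet? l j = none := by
  rw [PySem.List.pyGet?_of_nonneg _ (by omega)]
  simp; omega

theorem mod_two_cases (x : Int) : PySem.Int.mod x 2 = 0 ∨ PySem.Int.mod x 2 = 1 := by
  rw [PySem.Int.mod_eq_emod_of_pos (by omega)]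
  omega

theorem maxEvenStep_even_none (L x : Int) (hx : PySem.Int.mod x 2 = 0) :
    maxEvenStep none (L, x) = some (x, L) := by
  unfold maxEvenStep; rw [hx]; rfl

theorem maxEvenStep_even_some (L x w k : Int) (hx : PySem.Int.mod x 2 = 0) :
    maxEvenStep (some (w, k)) (L, x) = if x ≥ w then some (x, L) else some (w, k) := by
  unfold maxEvenStep; rw [hx]; rfl

theorem maxEvenStep_odd (L x : Int) (acc : Option (Int × Int)) (hx : ¬ PySem.Int.mod x 2 = 0) :
    maxEvenStep acc (L, x) = acc := by
  have h1 : PySem.Int.mod x 2 = 1 := by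
    rcases mod_two_cases x with h0 | h1
    · exact absurd h0 hx
    · exact h1
  unfold maxEvenStep; rw [h1]
  cases acc <;> rfl

theorem inv_holds : ∀ l : List Int, InvME l := by
  intro l
  induction l using List.reverseRecOn with
  | nil =>
    constructor
    · simp [bestOf, PySem.List.enumerate_nil]
    · intro v i h; simp [bestOf, PySem.List.enumerate_nil] at h
  | append_singleton l x ih =>
    obtain ⟨ih1, ih2⟩ := ih
    have hstep : bestOf (l ++ [x]) = maxEvenStep (bestOf l) ((l.length : Int), x) :=
      bestOf_append l x
    have hfil : (l ++ [x]).filter (fun num => PySem.Int.mod num 2 == 0) =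
        l.filter (fun num => PySem.Int.mod num 2 == 0) ++
          (if (PySem.Int.mod x 2 == 0) = true then [x] else []) := by
      rw [List.filter_append, List.filter_singleton]
      cases PySem.Int.mod x 2 == 0 <;> rfl
    by_cases hx : PySem.Int.mod x 2 = 0
    · -- x even
      have hxt : ((PySem.Int.mod x 2 == 0) = true) := by rw [hx]; rfl
      unfold InvME
      rw [hfil, if_pos hxt]
      constructor
      · -- never none after an even element
        rw [hstep]
        constructor
        · intro h; exfalso
          cases hb : bestOf l with
          | none =>
            rw [hb, maxEvenStep_even_none _ _ hx] at h
            simp at h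
          | some p =>
            rcases p with ⟨w, k⟩
            rw [hb, maxEvenStep_even_some _ _ _ _ hx] at h
            split at h <;> simp at h
        · intro h; exact absurd h (by simp)
      · intro v i h
        rw [hstep] at h
        cases hb : bestOf l with
        | none =>
          rw [hb, maxEvenStep_even_none _ _ hx] at h
          have hfe : l.filter (fun num => PySem.Int.mod num 2 == 0) = [] := ih1.mp hb
          obtain ⟨rfl, rfl⟩ : x = v ∧ (l.length : Int) = i := by simpa using h
          refine ⟨hx, ?_, by omega, by simp only [List.length_append, List.length_cons, List.length_nil]; push_cast; omega, ?_, ?_⟩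
          · rw [hfe, List.nil_append, PySem.List.max?_id_cons]; simp
          · exact PySem.List.pyGet?_append_length l [] x
          · intro j hj1 hj2
            rw [pyGet?_ge_len]
            · simp
            · simp at hj2 ⊢; omega
        | some p =>
          rcases p with ⟨w, k⟩
          rw [hb, maxEvenStep_even_some _ _ _ _ hx] at h
          obtain ⟨hw2, hwmax, hk0, hklt, hkget, hklast⟩ := ih2 w k hb
          rw [max?_id_append, hwmax]
          by_cases hge : x ≥ w
          · rw [if_pos hge] at h
            obtain ⟨rfl, rfl⟩ : x = v ∧ (l.length : Int) = i := by simpa using h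
            refine ⟨hx, by simp [max_eq_right hge], by omega, by simp only [List.length_append, List.length_cons, List.length_nil]; push_cast; omega, ?_, ?_⟩
            · exact PySem.List.pyGet?_append_length l [] x
            · intro j hj1 hj2
              rw [pyGet?_ge_len]
              · simp
              · simp at hj2 ⊢; omega
          · rw [if_neg hge] at h
            obtain ⟨rfl, rfl⟩ : w = v ∧ k = i := by simpa using h
            have hmax : max w x = w := max_eq_left (by omega)
            refine ⟨hw2, by simp [hmax], hk0, by simp only [List.length_append, List.length_cons, List.length_nil]; push_cast; omega, ?_, ?_⟩
            · rw [pyGet?_append_lt l x k hk0 hklt]; exact hkget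
            · intro j hj1 hj2
              simp at hj2
              by_cases hjl : j < (l.length : Int)
              · rw [pyGet?_append_lt l x j (by omega) hjl]
                exact hklast j hj1 hjl
              · have hje : j = (l.length : Int) := by omega
                subst hje
                rw [PySem.List.pyGet?_append_length l [] x]
                intro hc; simp at hc; omega
    · -- x odd: everything unchanged
      have hsame : bestOf (l ++ [x]) = bestOf l := by
        rw [hstep, maxEvenStep_odd _ _ _ hx]
      have hx1 : PySem.Int.mod x 2 = 1 := by
        rcases mod_two_cases x with h0 | h1
        · exact absurd h0 hx
        · exact h1
      have hxne : (PySem.Int.mod x 2 == 0) = false := by rw [hx1]; rfl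
      unfold InvME
      rw [hfil]
      simp only [hxne, Bool.false_eq_true, if_false, List.append_nil]
      constructor
      · rw [hsame]; exact ih1
      · intro v i h
        rw [hsame] at h
        obtain ⟨hv2, hvmax, hi0, hilt, higet, hilast⟩ := ih2 v i h
        refine ⟨hv2, hvmax, hi0, by simp only [List.length_append, List.length_cons, List.length_nil]; push_cast; omega, ?_, ?_⟩
        · rw [pyGet?_append_lt l x i hi0 hilt]; exact higet
        · intro j hj1 hj2
          simp at hj2
          by_cases hjl : j < (l.length : Int)
          · rw [pyGet?_append_lt l x j (by omega) hjl]
            exact hilast j hj1 hjl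
          · have hje : j = (l.length : Int) := by omega
            subst hje
            rw [PySem.List.pyGet?_append_length l [] x]
            intro hc; simp at hc
            rcases mod_two_cases x with h0 | h1
            · exact hx h0
            · rw [hc] at h1; rw [hv2] at h1; omega

-- the descending scan finds exactly the known last index
theorem find_desc_aux (l : List Int) (m i : Int) (h0 : 0 ≤ i)
    (hv : PySem.List.pyGet? l i = some m)
    (hj : ∀ j : Int, i < j → j < (l.length : Int) → PySem.List.pyGet? l j ≠ some m) :
    ∀ (n : Nat) (a : Int), a = i + n → a < (l.length : Int) →
    (PySem.List.pyRange a (-1) (-1)).find? (fun j => PySem.List.pyGet? l j == some m) = some i := by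
  intro n
  induction n with
  | zero =>
    intro a ha _
    have : a = i := by omega
    subst this
    rw [PySem.List.pyRange_neg_one_cons (by omega)]
    simp [List.find?, hv]
  | succ k ihk =>
    intro a ha hlt
    rw [PySem.List.pyRange_neg_one_cons (by omega)]
    have hne : PySem.List.pyGet? l a ≠ some m := hj a (by omega) hlt
    simp only [List.find?]
    have : (PySem.List.pyGet? l a == some m) = false := by
      simp [hne]
    rw [this]
    exact ihk (a - 1) (by omega) (by omega)

-- ===== VERDICT (by name: the statement is the Claim_ definition above) =====
theorem max_even_spec : Claim_equal_max_even := by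
  intro numbers _ _
  unfold Spec_max_even
  obtain ⟨h1, h2⟩ := inv_holds numbers
  cases hb : bestOf numbers with
  | none =>
    have hfe := h1.mp hb
    unfold max_even max_even_alt
    rw [hfe]
    simp [bestOf] at hb
    simp [hb]
  | some p =>
    rcases p with ⟨v, i⟩
    obtain ⟨hv2, hvmax, hi0, hilt, higet, hilast⟩ := h2 v i hb
    have hne : numbers.filter (fun num => PySem.Int.mod num 2 == 0) ≠ [] := by
      intro hc
      have := h1.mpr hc
      rw [hb] at this; simp at this
    unfold max_even max_even_alt
    simp only
    rw [if_pos (by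
      cases hfil : numbers.filter (fun num => PySem.Int.mod num 2 == 0) with
      | nil => exact absurd hfil hne
      | cons a t => simp)]
    simp only [hvmax]
    have hlen : 0 < (numbers.length : Int) := by omega
    rw [find_desc_aux numbers v i hi0 higet hilast (((numbers.length : Int) - 1 - i).toNat)
      ((numbers.length : Int) - 1) (by omega) (by omega)]
    simp [bestOf] at hb
    simp [hb]
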